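-- pv_equiv track=rewrite | github.com/chrisrimmer1/whatsapp-chat-analyzer | chat_analyzer.py | _format_generic_markdown
-- ===== SOURCE A (Python) =====
-- from typing import List, Dict, Any, Optional
--
-- def _format_generic_markdown(candidates: List[Dict[str, Any]], query_type: str) -> str:
--     """Generic formatter for other types"""
--
--     lines = [
--         f"# {query_type.title()} from Chat",
--         "",
--         f"*Total items found: {len(candidates)}*",
--         "",
--         "---",
--         ""
--     ]
--
--     # Group by date
--     by_date = {}
--     for candidate in candidates:
--         date = candidate['date']
--         if date not in by_date:
--             by_date[date] = []
--         by_date[date].append(candidate)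
--
--     for date in sorted(by_date.keys()):
--         lines.append(f"## {date}")
--         lines.append("")
--
--         for item in by_date[date]:
--             lines.append(f"- **{item['time']}** - {item['sender']}: {item['content'][:200]}{'...' if len(item['content']) > 200 else ''}")
--
--         lines.append("")
--
--     return "\n".join(lines)
-- ===== SOURCE B (Python) =====
-- def _format_generic_markdown(candidates, query_type):
--     """Generic formatter for other types"""
--
--     header = (
--         f"# {query_type.title()} from Chat\n"
--         "\n"
--         f"*Total items found: {len(candidates)}*\n"
--         "\n"
--         "---\n"
--     )
--
--     # Stable sort by date alone keeps the original within-date order,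
--     # then one index walk over the runs of equal dates replaces A's grouping dict.
--     ordered = sorted(candidates, key=lambda c: c['date'])
--     sections = []
--     i, n = 0, len(ordered)
--     while i < n:
--         date = ordered[i]['date']
--         bullets = []
--         while i < n and ordered[i]['date'] == date:
--             item = ordered[i]
--             content = item['content']
--             bullets.append(
--                 f"- **{item['time']}** - {item['sender']}: "
--                 + (content[:200] + '...' if len(content) > 200 else content)
--             )
--             i += 1
--         sections.append(f"## {date}\n\n" + "\n".join(bullets) + "\n")
--
--     return "\n".join([header] + sections)
-- ===== Notes on version B (the rewrite author's own statement) =====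
-- stated objective: alternative
-- what changed: Replaces A's grouping dict and flat line list by a single stable sort on date, an index walk over the runs of equal dates, and whole section strings (header and per-date blocks) joined at the end.
import Mathlib
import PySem

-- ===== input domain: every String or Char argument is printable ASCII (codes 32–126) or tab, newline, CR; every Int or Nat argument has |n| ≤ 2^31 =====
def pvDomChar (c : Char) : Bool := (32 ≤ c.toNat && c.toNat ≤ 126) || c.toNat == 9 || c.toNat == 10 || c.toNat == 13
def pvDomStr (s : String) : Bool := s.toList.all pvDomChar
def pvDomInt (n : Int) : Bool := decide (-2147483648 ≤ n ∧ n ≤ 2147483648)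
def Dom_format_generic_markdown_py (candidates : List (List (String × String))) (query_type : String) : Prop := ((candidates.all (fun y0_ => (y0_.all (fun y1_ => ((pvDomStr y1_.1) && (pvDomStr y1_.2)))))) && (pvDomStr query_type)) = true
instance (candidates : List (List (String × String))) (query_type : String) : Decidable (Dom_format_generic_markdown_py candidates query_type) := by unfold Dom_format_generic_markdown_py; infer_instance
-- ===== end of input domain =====

-- B replaces A's grouping dict and flat line list by one stable sort on date, a walk over runs of equal dates, and whole section strings joined at the end (alternative decomposition, same output).


-- ===== PORT A =====
-- candidate[k]: Python dict lookup = first match in the association list; Pre_ guarantees the key is present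
def pvGet (c : List (String × String)) (k : String) : String :=
  ((c.find? (fun p => p.1 == k)).map Prod.snd).getD ""

-- str.title(), hand-ported (exact on the ASCII domain: a letter is uppercased iff the previous char is not a letter, otherwise lowercased)
def pvTitleGo : Bool → List Char → List Char
  | _, [] => []
  | prev, c :: rest =>
    (if PySem.Chars.isalpha c then
        (if prev then PySem.Chars.lowerChar c else PySem.Chars.upperChar c)
      else c) :: pvTitleGo (PySem.Chars.isalpha c) rest

def pvTitle (s : String) : String := String.ofList (pvTitleGo false s.toList)

-- the six header lines of A's 'lines' list
def pvHeader (candidates : List (List (String × String))) (query_type : String) : List String :=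
  ["# " ++ pvTitle query_type ++ " from Chat",
   "",
   "*Total items found: " ++ PySem.Int.toStr (candidates.length : Int) ++ "*",
   "",
   "---",
   ""]

-- A's bullet f-string; item['content'][:200] and len(item['content']) > 200 via PySem
def pvBullet (item : List (String × String)) : String :=
  "- **" ++ pvGet item "time" ++ "** - " ++ pvGet item "sender" ++ ": "
    ++ String.ofList (PySem.List.slice (pvGet item "content").toList none (some 200))
    ++ (if PySem.Str.len (pvGet item "content") > 200 then "..." else "")

def format_generic_markdown_py (candidates : List (List (String × String))) (query_type : String) : String :=
  let lines := pvHeader candidates query_type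
  -- 'if date not in by_date: by_date[date] = []' then append  =  d.modify date [] (· ++ [c])
  let by_date : PySem.Dict String (List (List (String × String))) :=
    candidates.foldl (fun d c => d.modify (pvGet c "date") [] (fun g => g ++ [c])) PySem.Dict.empty
  let lines := (PySem.List.sorted by_date.keys (fun x => x)).foldl
    (fun ls date =>
      let ls := ls ++ ["## " ++ date]
      let ls := ls ++ [""]
      let ls := (by_date.getD date []).foldl (fun ls item => ls ++ [pvBullet item]) ls
      ls ++ [""]) lines
  PySem.Str.join "\n" lines

-- ===== PORT B =====
-- the two nested while loops over the index i of the sorted list = one structural walk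
-- splitting off, at each step, the run of candidates sharing the first date
def pvWalk : List (List (String × String)) → List String
  | [] => []
  | x :: rest =>
    let date := pvGet x "date"
    let run := x :: rest.takeWhile (fun y => pvGet y "date" == date)
    let bullets := run.map (fun item =>
      let content := pvGet item "content"
      "- **" ++ pvGet item "time" ++ "** - " ++ pvGet item "sender" ++ ": "
        ++ (if PySem.Str.len content > 200 then
              String.ofList (PySem.List.slice content.toList none (some 200)) ++ "..."
            else content))
    ("## " ++ date ++ "\n\n" ++ PySem.Str.join "\n" bullets ++ "\n")
      :: pvWalk (rest.dropWhile (fun y => pvGet y "date" == date))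
termination_by l => l.length
decreasing_by
  simpa using Nat.lt_succ_of_le (List.length_dropWhile_le _ rest)

def format_generic_markdown_py_alt (candidates : List (List (String × String))) (query_type : String) : String :=
  let header := "# " ++ pvTitle query_type ++ " from Chat" ++ "\n" ++ "\n"
      ++ "*Total items found: " ++ PySem.Int.toStr (candidates.length : Int) ++ "*" ++ "\n" ++ "\n"
      ++ "---" ++ "\n"
  let ordered := PySem.List.sorted candidates (fun c => pvGet c "date")
  let sections := pvWalk ordered
  PySem.Str.join "\n" (header :: sections)

-- ===== PRECONDITION & SPEC =====
-- Pre_ excludes exactly the inputs where the Python A raises KeyError: some candidate lacks one of the keys 'date', 'time', 'sender', 'content'.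
def Pre_format_generic_markdown_py (candidates : List (List (String × String))) (query_type : String) : Prop :=
  ∀ c ∈ candidates, "date" ∈ c.map Prod.fst ∧ "time" ∈ c.map Prod.fst ∧
    "sender" ∈ c.map Prod.fst ∧ "content" ∈ c.map Prod.fst
instance (candidates : List (List (String × String))) (query_type : String) : Decidable (Pre_format_generic_markdown_py candidates query_type) := by unfold Pre_format_generic_markdown_py; infer_instance

def pvWitness_format_generic_markdown_py : (List (List (String × String))) × String :=
  ([[("date", "2024-01-01"), ("time", "10:00"), ("sender", "Ann"), ("content", "hello")],
    [("date", "2024-01-01"), ("time", "11:00"), ("sender", "Bob"), ("content", "hi")]], "notes")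

def Spec_format_generic_markdown_py (candidates : List (List (String × String))) (query_type : String) (out : String) : Prop := out = format_generic_markdown_py_alt candidates query_type
instance (candidates : List (List (String × String))) (query_type : String) (out : String) : Decidable (Spec_format_generic_markdown_py candidates query_type out) := by unfold Spec_format_generic_markdown_py; infer_instance

-- ===== CLAIM (what is proved, stated in full; the proofs are below) =====
def Claim_equal_format_generic_markdown_py : Prop := ∀ (candidates : List (List (String × String))) (query_type : String), Dom_format_generic_markdown_py candidates query_type → Pre_format_generic_markdown_py candidates query_type → Spec_format_generic_markdown_py candidates query_type (format_generic_markdown_py candidates query_type)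

-- ===== LEMMAS AND PROOFS =====

-- proof-side shorthands
def pvKey (c : List (String × String)) : String := pvGet c "date"

def pvSecLines (d : String) (g : List (List (String × String))) : List String :=
  ["## " ++ d, ""] ++ g.map pvBullet ++ [""]

def pvSecStr (d : String) (g : List (List (String × String))) : String :=
  "## " ++ d ++ "\n\n" ++ PySem.Str.join "\n" (g.map pvBullet) ++ "\n"

-- the run decomposition behind pvWalk
def pvRuns : List (List (String × String)) → List (String × List (List (String × String)))
  | [] => []
  | x :: rest =>
    (pvKey x, x :: rest.takeWhile (fun y => pvKey y == pvKey x)) ::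
      pvRuns (rest.dropWhile (fun y => pvKey y == pvKey x))
termination_by l => l.length
decreasing_by
  simpa using Nat.lt_succ_of_le (List.length_dropWhile_le _ rest)

-- small list facts
theorem pv_flatMap_eq {α β : Type} (f : α → List β) (l : List α) :
    l.flatMap f = (l.map f).flatten := by
  induction l with
  | nil => simp
  | cons a t ih => simp [ih]

theorem pv_flatMap_map {α β γ : Type} (g : α → β) (f : β → List γ) (l : List α) :
    (l.map g).flatMap f = l.flatMap (fun x => f (g x)) := by
  induction l with
  | nil => simp
  | cons a t ih => simp [ih]

theorem pv_map_flatMap {α β γ : Type} (f : β → γ) (g : α → List β) (l : List α) :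
    (l.flatMap g).map f = l.flatMap (fun x => (g x).map f) := by
  induction l with
  | nil => simp
  | cons a t ih => simp [ih]

theorem pv_flatMap_congr {α β : Type} (l : List α) (f g : α → List β)
    (h : ∀ x ∈ l, f x = g x) : l.flatMap f = l.flatMap g := by
  induction l with
  | nil => simp
  | cons a t ih =>
    simp only [List.flatMap_cons, h a (List.mem_cons_self), ih (fun x hx => h x (List.mem_cons_of_mem _ hx))]

-- ---------- A-side reduction ----------

theorem pv_getD_group (l : List (List (String × String)))
    (d : PySem.Dict String (List (List (String × String)))) (c : String) :
    (l.foldl (fun d x => d.modify (pvGet x "date") [] (fun g => g ++ [x])) d).getD c []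
      = d.getD c [] ++ l.filter (fun x => pvGet x "date" == c) := by
  induction l generalizing d with
  | nil => simp
  | cons x xs ih =>
    simp only [List.foldl_cons, ih, List.filter_cons]
    rw [PySem.Dict.getD_modify]
    by_cases h : c = pvGet x "date"
    · simp [h]
    · simp [h, Ne.symm h]

theorem pv_keys_group (l : List (List (String × String))) :
    (l.foldl (fun d x => d.modify (pvGet x "date") [] (fun g => g ++ [x]))
        (PySem.Dict.empty : PySem.Dict String (List (List (String × String))))).keys
      = PySem.Set.ofList (l.map (fun c => pvGet c "date")) := by
  rw [PySem.Dict.keys_foldl_modify_key l (fun c => pvGet c "date") [] (fun _ x g => g ++ [x])]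
  rw [PySem.Set.update_eq_append_filter]
  simp [PySem.Dict.keys_empty, PySem.Set.contains]

theorem pv_foldl_sec (G : String → List (List (String × String)))
    (dates : List String) (acc : List String) :
    dates.foldl (fun ls date =>
        ((G date).foldl (fun ls item => ls ++ [pvBullet item]) ((ls ++ ["## " ++ date]) ++ [""]))
          ++ [""]) acc
      = acc ++ dates.flatMap (fun d => pvSecLines d (G d)) := by
  induction dates generalizing acc with
  | nil => simp
  | cons d ds ih =>
    simp only [List.foldl_cons, PySem.List.foldl_append_singleton_eq_map, ih, List.flatMap_cons,
      pvSecLines]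
    simp [List.append_assoc, pv_flatMap_eq]

theorem pv_A_eq (candidates : List (List (String × String))) (query_type : String) :
    format_generic_markdown_py candidates query_type
      = PySem.Str.join "\n" (pvHeader candidates query_type ++
          (PySem.List.sorted (PySem.Set.ofList (candidates.map pvKey)) (fun x => x)).flatMap
            (fun d => pvSecLines d (candidates.filter (fun x => pvKey x == d)))) := by
  simp only [format_generic_markdown_py, pv_keys_group, pv_foldl_sec, pv_getD_group,
    PySem.Dict.getD_empty, List.nil_append, pvKey]
  rfl

-- ---------- stability of the sort ----------

theorem pv_filter_insertBy (c : String) (x : List (String × String))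
    (acc : List (List (String × String)))
    (h : acc.Pairwise (fun a b => pvKey a ≤ pvKey b)) :
    (PySem.List.insertBy (fun a b => decide (pvKey a < pvKey b)) x acc).filter
        (fun y => pvKey y == c)
      = acc.filter (fun y => pvKey y == c) ++ (if pvKey x == c then [x] else []) := by
  induction acc with
  | nil => simp [PySem.List.insertBy, List.filter_singleton]
  | cons y ys ih =>
    rw [List.pairwise_cons] at h
    by_cases hb : pvKey x < pvKey y
    · have hins : PySem.List.insertBy (fun a b => decide (pvKey a < pvKey b)) x (y :: ys)
          = x :: y :: ys := by simp [PySem.List.insertBy, hb]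
      rw [hins, List.filter_cons]
      by_cases hx : (pvKey x == c) = true
      · have hc : pvKey x = c := by simpa using hx
        have hnone : (y :: ys).filter (fun z => pvKey z == c) = [] := by
          apply List.filter_eq_nil_iff.mpr
          intro z hz
          have hyz : pvKey y ≤ pvKey z := by
            rcases List.mem_cons.mp hz with rfl | hz'
            · exact le_refl _
            · exact h.1 z hz'
          have hlt : c < pvKey z := lt_of_lt_of_le (hc ▸ hb) hyz
          simpa using (ne_of_gt hlt)
        simp [hx, hnone]
      · simp [hx]
    · have hins : PySem.List.insertBy (fun a b => decide (pvKey a < pvKey b)) x (y :: ys)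
          = y :: PySem.List.insertBy (fun a b => decide (pvKey a < pvKey b)) x ys := by
        simp [PySem.List.insertBy, hb]
      rw [hins, List.filter_cons, List.filter_cons, ih h.2]
      by_cases hy : (pvKey y == c) = true <;> simp [hy]

theorem pv_filter_sorted (c : String) (l : List (List (String × String))) :
    (PySem.List.sorted l pvKey).filter (fun y => pvKey y == c)
      = l.filter (fun y => pvKey y == c) := by
  induction l using List.reverseRecOn with
  | nil => simp [PySem.List.sorted_eq_foldl_insertBy]
  | append_singleton xs x ih =>
    have hstep : PySem.List.sorted (xs ++ [x]) pvKey
        = PySem.List.insertBy (fun a b => decide (pvKey a < pvKey b)) x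
            (PySem.List.sorted xs pvKey) := by
      rw [PySem.List.sorted_eq_foldl_insertBy, PySem.List.sorted_eq_foldl_insertBy,
        List.foldl_append, List.foldl_cons, List.foldl_nil]
    rw [hstep, pv_filter_insertBy c x _ (PySem.List.sorted_pairwise xs pvKey), ih,
      List.filter_append]
    by_cases hx : (pvKey x == c) = true <;> simp [hx]

-- ---------- run lemmas ----------

theorem pv_dropWhile_gt (x : List (String × String)) (rest : List (List (String × String)))
    (h : (x :: rest).Pairwise (fun a b => pvKey a ≤ pvKey b)) :
    ∀ z ∈ rest.dropWhile (fun y => pvKey y == pvKey x), pvKey x < pvKey z := by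
  intro z hz
  rcases hd : rest.dropWhile (fun y => pvKey y == pvKey x) with _ | ⟨y0, zs⟩
  · rw [hd] at hz; simp at hz
  · have hsub : (y0 :: zs).Sublist rest := (hd ▸ (List.dropWhile_suffix _)).sublist
    have hPair : (y0 :: zs).Pairwise (fun a b => pvKey a ≤ pvKey b) :=
      ((List.pairwise_cons.mp h).2).sublist hsub
    have hy0 : ¬ (pvKey y0 == pvKey x) = true := by
      have := List.head?_dropWhile_not (fun y => pvKey y == pvKey x) rest
      rw [hd] at this; simpa using this
    have hxy0 : pvKey x < pvKey y0 := by
      have hmem : y0 ∈ rest := hsub.subset (List.mem_cons_self)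
      have hle : pvKey x ≤ pvKey y0 := (List.pairwise_cons.mp h).1 y0 hmem
      exact lt_of_le_of_ne hle (fun e => hy0 (by simp [e]))
    rw [hd] at hz
    rcases List.mem_cons.mp hz with rfl | hz'
    · exact hxy0
    · exact lt_of_lt_of_le hxy0 ((List.pairwise_cons.mp hPair).1 z hz')

theorem pv_runs_keys_mem (l : List (List (String × String))) (d : String) :
    d ∈ (pvRuns l).map Prod.fst ↔ d ∈ l.map pvKey := by
  induction l using pvRuns.induct with
  | case1 => simp [pvRuns]
  | case2 x rest ih =>
    rw [pvRuns]
    simp only [List.map_cons, List.mem_cons, ih]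
    constructor
    · rintro (rfl | hmem)
      · exact Or.inl rfl
      · exact Or.inr (((List.dropWhile_sublist _).map pvKey).subset hmem)
    · rintro (rfl | hmem)
      · exact Or.inl rfl
      · rcases List.mem_map.mp hmem with ⟨z, hz, rfl⟩
        conv at hz => rw [← List.takeWhile_append_dropWhile
          (p := fun y => pvKey y == pvKey x) (l := rest)]
        rcases List.mem_append.mp hz with hzt | hzd
        · have hzx : pvKey z = pvKey x := by
            simpa using List.mem_takeWhile_imp (p := fun y => pvKey y == pvKey x) hzt
          exact Or.inl hzx
        · exact Or.inr (List.mem_map.mpr ⟨z, hzd, rfl⟩)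

theorem pv_runs_keys_lt (l : List (List (String × String)))
    (h : l.Pairwise (fun a b => pvKey a ≤ pvKey b)) :
    ((pvRuns l).map Prod.fst).Pairwise (· < ·) := by
  induction l using pvRuns.induct with
  | case1 => simp [pvRuns]
  | case2 x rest ih =>
    rw [pvRuns]
    have hrest : (rest.dropWhile (fun y => pvKey y == pvKey x)).Pairwise
        (fun a b => pvKey a ≤ pvKey b) :=
      ((List.pairwise_cons.mp h).2).sublist (List.dropWhile_sublist _)
    refine List.pairwise_cons.mpr ⟨?_, ih hrest⟩
    intro d hd
    rcases List.mem_map.mp ((pv_runs_keys_mem _ d).mp hd) with ⟨z, hz, rfl⟩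
    exact pv_dropWhile_gt x rest h z hz

theorem pv_runs_groups (l : List (List (String × String)))
    (h : l.Pairwise (fun a b => pvKey a ≤ pvKey b)) :
    ∀ r ∈ pvRuns l, r.2 = l.filter (fun y => pvKey y == r.1) ∧ r.2 ≠ [] := by
  induction l using pvRuns.induct with
  | case1 => simp [pvRuns]
  | case2 x rest ih =>
    rw [pvRuns]
    have hrest : (rest.dropWhile (fun y => pvKey y == pvKey x)).Pairwise
        (fun a b => pvKey a ≤ pvKey b) :=
      ((List.pairwise_cons.mp h).2).sublist (List.dropWhile_sublist _)
    intro r hr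
    rcases List.mem_cons.mp hr with rfl | hr'
    · refine ⟨?_, by simp⟩
      have htake : (rest.takeWhile (fun y => pvKey y == pvKey x)).filter
          (fun y => pvKey y == pvKey x) = rest.takeWhile (fun y => pvKey y == pvKey x) :=
        List.filter_eq_self.mpr (fun z hz => List.mem_takeWhile_imp (p := fun y => pvKey y == pvKey x) hz)
      have hdrop : (rest.dropWhile (fun y => pvKey y == pvKey x)).filter
          (fun y => pvKey y == pvKey x) = [] := by
        apply List.filter_eq_nil_iff.mpr
        intro z hz
        simpa using (ne_of_gt (pv_dropWhile_gt x rest h z hz))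
      have hrest_filter : rest.filter (fun y => pvKey y == pvKey x)
          = rest.takeWhile (fun y => pvKey y == pvKey x) := by
        conv_lhs => rw [← List.takeWhile_append_dropWhile
          (p := fun y => pvKey y == pvKey x) (l := rest)]
        rw [List.filter_append, htake, hdrop, List.append_nil]
      show x :: rest.takeWhile (fun y => pvKey y == pvKey x)
          = (x :: rest).filter (fun y => pvKey y == pvKey x)
      rw [List.filter_cons, hrest_filter]
      simp
    · rcases ih hrest r hr' with ⟨hg, hne⟩
      refine ⟨?_, hne⟩
      have hgt : pvKey x < r.1 := by
        have hm : r.1 ∈ (pvRuns (rest.dropWhile (fun y => pvKey y == pvKey x))).map Prod.fst :=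
          List.mem_map.mpr ⟨r, hr', rfl⟩
        rcases List.mem_map.mp ((pv_runs_keys_mem _ r.1).mp hm) with ⟨z, hz, hzr⟩
        rw [← hzr]
        exact pv_dropWhile_gt x rest h z hz
      have htake : (rest.takeWhile (fun y => pvKey y == pvKey x)).filter
          (fun y => pvKey y == r.1) = [] := by
        apply List.filter_eq_nil_iff.mpr
        intro z hz
        have hzx : pvKey z = pvKey x := by simpa using List.mem_takeWhile_imp (p := fun y => pvKey y == pvKey x) hz
        simp only [hzx]
        simpa using (ne_of_lt hgt)
      have hsplit : rest.filter (fun y => pvKey y == r.1)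
          = (rest.dropWhile (fun y => pvKey y == pvKey x)).filter (fun y => pvKey y == r.1) := by
        conv_lhs => rw [← List.takeWhile_append_dropWhile
          (p := fun y => pvKey y == pvKey x) (l := rest)]
        rw [List.filter_append, htake, List.nil_append]
      rw [hg, ← hsplit, List.filter_cons]
      have hxne : (pvKey x == r.1) = false := by simpa using ne_of_lt hgt
      simp [hxne]

theorem pv_sortedDates_eq_runKeys (candidates : List (List (String × String))) :
    PySem.List.sorted (PySem.Set.ofList (candidates.map pvKey)) (fun x => x)
      = (pvRuns (PySem.List.sorted candidates pvKey)).map Prod.fst := by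
  apply PySem.List.sorted_eq_of_perm_of_pairwise_lt
  · have hnd : ((pvRuns (PySem.List.sorted candidates pvKey)).map Prod.fst).Nodup :=
      (pv_runs_keys_lt _ (PySem.List.sorted_pairwise candidates pvKey)).imp ne_of_lt
    refine (List.perm_ext_iff_of_nodup hnd (PySem.Set.nodup_ofList _)).mpr ?_
    intro a
    rw [pv_runs_keys_mem, PySem.Set.mem_ofList]
    constructor
    · intro ha
      rcases List.mem_map.mp ha with ⟨z, hz, rfl⟩
      exact List.mem_map.mpr ⟨z, (PySem.List.sorted_perm candidates pvKey false).mem_iff.mp hz, rfl⟩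
    · intro ha
      rcases List.mem_map.mp ha with ⟨z, hz, rfl⟩
      exact List.mem_map.mpr ⟨z, (PySem.List.sorted_perm candidates pvKey false).mem_iff.mpr hz, rfl⟩
  · exact pv_runs_keys_lt _ (PySem.List.sorted_pairwise candidates pvKey)

theorem pv_bullet_eq (item : List (String × String)) :
    ("- **" ++ pvGet item "time" ++ "** - " ++ pvGet item "sender" ++ ": "
        ++ (if PySem.Str.len (pvGet item "content") > 200 then
              String.ofList (PySem.List.slice (pvGet item "content").toList none (some 200)) ++ "..."
            else pvGet item "content"))
      = pvBullet item := by
  unfold pvBullet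
  by_cases h : PySem.Str.len (pvGet item "content") > 200
  · rw [if_pos h, if_pos h]
    simp [String.append_assoc]
  · rw [if_neg h, if_neg h, String.append_empty]
    congr 1
    have he : PySem.Str.len (pvGet item "content")
        = ((pvGet item "content").toList.length : Int) := by
      simp [PySem.Str.len]
    rw [he] at h
    have hlen : (pvGet item "content").toList.length ≤ 200 := by omega
    rw [PySem.List.slice_to _ (by norm_num), List.take_of_length_le (by simpa using hlen)]
    exact String.ofList_toList.symm

theorem pv_walk_eq (l : List (List (String × String))) :
    pvWalk l = (pvRuns l).map (fun r => pvSecStr r.1 r.2) := by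
  have hb : (fun item : List (String × String) =>
      "- **" ++ pvGet item "time" ++ "** - " ++ pvGet item "sender" ++ ": "
      ++ (if PySem.Str.len (pvGet item "content") > 200 then
            String.ofList (PySem.List.slice (pvGet item "content").toList none (some 200)) ++ "..."
          else pvGet item "content")) = pvBullet := funext pv_bullet_eq
  induction l using pvRuns.induct with
  | case1 => rw [pvWalk, pvRuns]; simp
  | case2 x rest ih =>
    rw [pvWalk, pvRuns, List.map_cons]
    simp only [pvKey] at ih ⊢
    rw [ih]
    unfold pvSecStr
    rw [hb]
    simp only [List.map_cons]
    rw [pv_bullet_eq x]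

-- ---------- join arithmetic ----------

theorem pv_join_append (sep : List Char) (as bs : List (List Char))
    (ha : as ≠ []) (hb : bs ≠ []) :
    PySem.Chars.join sep (as ++ bs)
      = PySem.Chars.join sep as ++ sep ++ PySem.Chars.join sep bs := by
  induction as with
  | nil => exact absurd rfl ha
  | cons a as' ih =>
    cases as' with
    | nil =>
      cases bs with
      | nil => exact absurd rfl hb
      | cons b bs' =>
        rw [List.singleton_append, PySem.Chars.join_cons_cons, PySem.Chars.join_singleton]
    | cons a2 as2 =>
      rw [List.cons_append, List.cons_append, PySem.Chars.join_cons_cons]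
      rw [← List.cons_append, ih (by simp)]
      rw [PySem.Chars.join_cons_cons]
      simp [List.append_assoc]

theorem pv_join_blocks (sep : List Char) (xss : List (List (List Char)))
    (h : ∀ b ∈ xss, b ≠ []) :
    PySem.Chars.join sep xss.flatten = PySem.Chars.join sep (xss.map (PySem.Chars.join sep)) := by
  induction xss with
  | nil => simp [PySem.Chars.join_nil]
  | cons b bs ih =>
    have hb : b ≠ [] := h b (List.mem_cons_self)
    cases bs with
    | nil => simp [PySem.Chars.join_singleton]
    | cons b2 bs2 =>
      have hb2 : b2 ≠ [] := h b2 (by simp)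
      have hne : (b2 :: bs2).flatten ≠ [] := by
        cases b2 with
        | nil => exact absurd rfl hb2
        | cons c cs => simp
      rw [List.flatten_cons, pv_join_append sep b _ hb hne,
        ih (fun y hy => h y (List.mem_cons_of_mem _ hy))]
      simp only [List.map_cons]
      rw [PySem.Chars.join_cons_cons]

theorem pv_nl_toList : ("\n" : String).toList = ['\n'] := rfl
theorem pv_nlnl_toList : ("\n\n" : String).toList = ['\n', '\n'] := rfl
theorem pv_empty_toList : ("" : String).toList = [] := rfl

theorem pv_header_toList (candidates : List (List (String × String))) (query_type : String) :
    ("# " ++ pvTitle query_type ++ " from Chat" ++ "\n" ++ "\n"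
      ++ "*Total items found: " ++ PySem.Int.toStr (candidates.length : Int) ++ "*" ++ "\n" ++ "\n"
      ++ "---" ++ "\n").toList
      = PySem.Chars.join ['\n'] ((pvHeader candidates query_type).map String.toList) := by
  simp [pvHeader, PySem.Chars.join_cons_cons, PySem.Chars.join_singleton, String.toList_append,
    pv_nl_toList, pv_empty_toList, List.append_assoc]

theorem pv_sec_toList (d : String) (g : List (List (String × String))) (hg : g ≠ []) :
    (pvSecStr d g).toList
      = PySem.Chars.join ['\n'] ((pvSecLines d g).map String.toList) := by
  cases g with
  | nil => exact absurd rfl hg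
  | cons g0 gs =>
    unfold pvSecStr pvSecLines
    simp only [String.toList_append, PySem.Str.toList_join, pv_nl_toList, pv_nlnl_toList,
      List.map_append, List.map_cons, List.map_nil, List.cons_append, List.nil_append]
    rw [PySem.Chars.join_cons_cons, PySem.Chars.join_cons_cons, ← List.cons_append]
    rw [pv_join_append ['\n']
      (String.toList (pvBullet g0) :: List.map String.toList (List.map pvBullet gs))
      [("" : String).toList] (by simp) (by simp)]
    simp [pv_empty_toList, PySem.Chars.join_singleton, List.append_assoc]

-- ===== VERDICT (by name: the statement is the Claim_ definition above) =====
set_option maxHeartbeats 1000000 in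
theorem format_generic_markdown_py_spec : Claim_equal_format_generic_markdown_py := by
  intro candidates query_type _ _
  unfold Spec_format_generic_markdown_py
  rw [pv_A_eq]
  simp only [format_generic_markdown_py_alt]
  have hkey : (fun c : List (String × String) => pvGet c "date") = pvKey := rfl
  rw [hkey, pv_walk_eq, pv_sortedDates_eq_runKeys]
  simp only [pv_flatMap_map]
  have hgroups := pv_runs_groups _ (PySem.List.sorted_pairwise candidates pvKey)
  have hcongr : (pvRuns (PySem.List.sorted candidates pvKey)).flatMap
        (fun r => pvSecLines r.1 (candidates.filter (fun x => pvKey x == r.1)))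
      = (pvRuns (PySem.List.sorted candidates pvKey)).flatMap
        (fun r => pvSecLines r.1 r.2) := by
    apply pv_flatMap_congr
    intro r hr
    rw [← pv_filter_sorted r.1 candidates, ← (hgroups r hr).1]
  rw [hcongr]
  -- pass to character lists
  have htl : (PySem.Str.join "\n" (pvHeader candidates query_type ++
        (pvRuns (PySem.List.sorted candidates pvKey)).flatMap
          (fun r => pvSecLines r.1 r.2))).toList
      = (PySem.Str.join "\n"
          (("# " ++ pvTitle query_type ++ " from Chat" ++ "\n" ++ "\n"
            ++ "*Total items found: " ++ PySem.Int.toStr (candidates.length : Int) ++ "*" ++ "\n" ++ "\n"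
            ++ "---" ++ "\n")
            :: (pvRuns (PySem.List.sorted candidates pvKey)).map
                 (fun r => pvSecStr r.1 r.2))).toList := by
    simp only [PySem.Str.toList_join, pv_nl_toList, List.map_append, List.map_cons,
      pv_map_flatMap]
    have hblocks : (pvHeader candidates query_type).map String.toList
          ++ (pvRuns (PySem.List.sorted candidates pvKey)).flatMap
               (fun r => (pvSecLines r.1 r.2).map String.toList)
        = ((pvHeader candidates query_type).map String.toList
            :: (pvRuns (PySem.List.sorted candidates pvKey)).map
                 (fun r => (pvSecLines r.1 r.2).map String.toList)).flatten := by
      rw [List.flatten_cons, pv_flatMap_eq]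
    rw [hblocks, pv_join_blocks]
    · simp only [List.map_cons, List.map_map]
      apply congrArg (PySem.Chars.join ['\n'])
      refine congrArg₂ List.cons ?_ ?_
      · exact (pv_header_toList candidates query_type).symm
      · apply List.map_congr_left
        intro r hr
        simp only [Function.comp_apply]
        exact (pv_sec_toList r.1 r.2 (hgroups r hr).2).symm
    · intro b hbmem
      rcases List.mem_cons.mp hbmem with rfl | hbmem'
      · simp [pvHeader]
      · rcases List.mem_map.mp hbmem' with ⟨r, hr, rfl⟩
        simp [pvSecLines]
  have h2 := congrArg String.ofList htl
  rw [String.ofList_toList, String.ofList_toList] at h2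
  exact h2
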